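-- pv_equiv track=rewrite | github.com/omarabdellall/RetrievalRouter4770 | src/augmented_retrieval/phase2_router.py | gain_decomposition_against_c2
-- ===== SOURCE A (Python) =====
-- from typing import Dict, List, Optional, Tuple
--
-- def gain_decomposition_against_c2(
--     qid_to_assigned_config: Dict[str, str],
--     config_labels: Dict[str, Dict[str, bool]],
-- ) -> Dict[str, int]:
--     helped = 0
--     hurt = 0
--     tied_correct = 0
--     tied_wrong = 0
--     switched = 0
--
--     for qid, assigned_cfg in qid_to_assigned_config.items():
--         assigned_correct = bool(config_labels[assigned_cfg][qid])
--         c2_correct = bool(config_labels["C2"][qid])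
--         if assigned_cfg != "C2":
--             switched += 1
--         if assigned_correct and not c2_correct:
--             helped += 1
--         elif c2_correct and not assigned_correct:
--             hurt += 1
--         elif assigned_correct and c2_correct:
--             tied_correct += 1
--         else:
--             tied_wrong += 1
--
--     return {
--         "helped_vs_c2": helped,
--         "hurt_vs_c2": hurt,
--         "net_gain_vs_c2": helped - hurt,
--         "switched_from_c2": switched,
--         "tied_correct": tied_correct,
--         "tied_wrong": tied_wrong,
--     }
-- ===== SOURCE B (Python) =====
-- def gain_decomposition_against_c2(qid_to_assigned_config, config_labels):
--     # Stage 1: materialize the outcome pair (assigned_correct, c2_correct) for every entry.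
--     pairs = [
--         (bool(config_labels[assigned_cfg][qid]), bool(config_labels["C2"][qid]))
--         for qid, assigned_cfg in qid_to_assigned_config.items()
--     ]
--     # Stage 2: each statistic is its own count over the materialized data.
--     helped = pairs.count((True, False))
--     hurt = pairs.count((False, True))
--     switched = len(qid_to_assigned_config) - list(qid_to_assigned_config.values()).count("C2")
--     return {
--         "helped_vs_c2": helped,
--         "hurt_vs_c2": hurt,
--         "net_gain_vs_c2": helped - hurt,
--         "switched_from_c2": switched,
--         "tied_correct": pairs.count((True, True)),
--         "tied_wrong": pairs.count((False, False)),
--     }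
-- ===== Notes on version B (the rewrite author's own statement) =====
-- stated objective: alternative
-- what changed: Replaces A's single pass with five counters and an if/elif chain by a map-then-count design: first materialize the list of (assigned_correct, c2_correct) outcome pairs, then obtain each statistic by a separate .count() pass over that list (switched from len minus a count of 'C2' in the values), with no branching at all.
import Mathlib
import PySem

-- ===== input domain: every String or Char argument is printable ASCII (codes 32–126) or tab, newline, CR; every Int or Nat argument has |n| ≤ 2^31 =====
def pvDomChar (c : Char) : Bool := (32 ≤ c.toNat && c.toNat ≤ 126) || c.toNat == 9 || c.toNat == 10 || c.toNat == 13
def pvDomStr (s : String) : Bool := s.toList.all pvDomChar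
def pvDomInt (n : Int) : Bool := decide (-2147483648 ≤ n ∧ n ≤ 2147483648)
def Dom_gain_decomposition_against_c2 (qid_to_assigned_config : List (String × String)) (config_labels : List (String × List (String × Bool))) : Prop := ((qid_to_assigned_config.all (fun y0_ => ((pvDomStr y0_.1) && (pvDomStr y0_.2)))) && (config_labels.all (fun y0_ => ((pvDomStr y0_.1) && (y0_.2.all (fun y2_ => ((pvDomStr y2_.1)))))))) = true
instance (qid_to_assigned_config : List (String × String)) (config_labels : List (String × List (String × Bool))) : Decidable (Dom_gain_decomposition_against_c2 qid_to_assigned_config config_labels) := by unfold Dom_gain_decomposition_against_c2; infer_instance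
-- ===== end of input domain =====

-- B is a map-then-count reimplementation: it first materializes the list of
-- (assigned_correct, c2_correct) outcome pairs, then obtains each statistic by a separate
-- .count() pass over that list (switched = len minus the count of "C2" among the values),
-- replacing A's single branching pass with five counters.

-- ===== PORT A =====
-- the dict lookup config_labels[cfg][qid]; none = KeyError
def pvLook (config_labels : List (String × List (String × Bool))) (cfg qid : String) : Option Bool :=
  (List.lookup cfg config_labels).bind (List.lookup qid)

def gdLoopA (config_labels : List (String × List (String × Bool))) :
    List (String × String) → Int × Int × Int × Int × Int → Option (Int × Int × Int × Int × Int)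
  | [], st => some st
  | (qid, cfg) :: rest, (h, u, tc, tw, sw) =>
    match pvLook config_labels cfg qid, pvLook config_labels "C2" qid with
    | some ac, some c2 =>
      let sw' : Int := if cfg ≠ "C2" then sw + 1 else sw
      if ac && !c2 then gdLoopA config_labels rest (h + 1, u, tc, tw, sw')
      else if c2 && !ac then gdLoopA config_labels rest (h, u + 1, tc, tw, sw')
      else if ac && c2 then gdLoopA config_labels rest (h, u, tc + 1, tw, sw')
      else gdLoopA config_labels rest (h, u, tc, tw + 1, sw')
    | _, _ => none

def gain_decomposition_against_c2 (qid_to_assigned_config : List (String × String)) (config_labels : List (String × List (String × Bool))) : List (String × Int) :=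
  match gdLoopA config_labels qid_to_assigned_config (0, 0, 0, 0, 0) with
  | some (h, u, tc, tw, sw) =>
    [("helped_vs_c2", h), ("hurt_vs_c2", u), ("net_gain_vs_c2", h - u),
     ("switched_from_c2", sw), ("tied_correct", tc), ("tied_wrong", tw)]
  | none => []

-- ===== PORT B =====
-- Stage 1 of Source B: the comprehension building the outcome pairs (none = KeyError)
def gdPairs (config_labels : List (String × List (String × Bool))) :
    List (String × String) → Option (List (Bool × Bool))
  | [] => some []
  | (qid, cfg) :: rest =>
    match pvLook config_labels cfg qid, pvLook config_labels "C2" qid with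
    | some ac, some c2 => (gdPairs config_labels rest).map (fun ps => (ac, c2) :: ps)
    | _, _ => none

def gain_decomposition_against_c2_alt (qid_to_assigned_config : List (String × String)) (config_labels : List (String × List (String × Bool))) : List (String × Int) :=
  match gdPairs config_labels qid_to_assigned_config with
  | some pairs =>
    -- Stage 2 of Source B: each statistic is its own count over the materialized data
    let helped : Int := PySem.List.count pairs (true, false)
    let hurt : Int := PySem.List.count pairs (false, true)
    let switched : Int :=
      (qid_to_assigned_config.length : Int) -
        (PySem.List.count (qid_to_assigned_config.map Prod.snd) "C2" : Int)
    [("helped_vs_c2", helped), ("hurt_vs_c2", hurt), ("net_gain_vs_c2", helped - hurt),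
     ("switched_from_c2", switched),
     ("tied_correct", (PySem.List.count pairs (true, true) : Int)),
     ("tied_wrong", (PySem.List.count pairs (false, false) : Int))]
  | none => []

-- ===== PRECONDITION & SPEC =====
-- Pre_ excludes exactly the inputs on which Python A raises KeyError: some entry's assigned config
-- or its qid is missing from config_labels, or the "C2" labels are missing for that qid.
def Pre_gain_decomposition_against_c2 (qid_to_assigned_config : List (String × String)) (config_labels : List (String × List (String × Bool))) : Prop :=
  ∀ p ∈ qid_to_assigned_config,
    (pvLook config_labels p.2 p.1).isSome = true ∧ (pvLook config_labels "C2" p.1).isSome = true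
instance (qid_to_assigned_config : List (String × String)) (config_labels : List (String × List (String × Bool))) : Decidable (Pre_gain_decomposition_against_c2 qid_to_assigned_config config_labels) := by unfold Pre_gain_decomposition_against_c2; infer_instance

def pvWitness_gain_decomposition_against_c2 : (List (String × String)) × (List (String × List (String × Bool))) :=
  ([("q1", "C1"), ("q2", "C2")],
   [("C1", [("q1", true), ("q2", false)]), ("C2", [("q1", false), ("q2", true)])])

def Spec_gain_decomposition_against_c2 (qid_to_assigned_config : List (String × String)) (config_labels : List (String × List (String × Bool))) (out : List (String × Int)) : Prop := out = gain_decomposition_against_c2_alt qid_to_assigned_config config_labels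
instance (qid_to_assigned_config : List (String × String)) (config_labels : List (String × List (String × Bool))) (out : List (String × Int)) : Decidable (Spec_gain_decomposition_against_c2 qid_to_assigned_config config_labels out) := by unfold Spec_gain_decomposition_against_c2; infer_instance

-- ===== CLAIM =====
def Claim_equal_gain_decomposition_against_c2 : Prop := ∀ (qid_to_assigned_config : List (String × String)) (config_labels : List (String × List (String × Bool))), Dom_gain_decomposition_against_c2 qid_to_assigned_config config_labels → Pre_gain_decomposition_against_c2 qid_to_assigned_config config_labels → Spec_gain_decomposition_against_c2 qid_to_assigned_config config_labels (gain_decomposition_against_c2 qid_to_assigned_config config_labels)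

-- ===== LEMMAS AND PROOFS =====
-- A's loop, started at (h,u,tc,tw,sw), lands at those counters shifted by the counts B reads
-- off the materialized pair list (and the non-"C2" count for switched).
lemma gdLoopA_eq_counts (config_labels : List (String × List (String × Bool))) :
    ∀ (l : List (String × String)) (ps : List (Bool × Bool)) (h u tc tw sw : Int),
      gdPairs config_labels l = some ps →
      gdLoopA config_labels l (h, u, tc, tw, sw) =
        some (h + PySem.List.count ps (true, false),
              u + PySem.List.count ps (false, true),
              tc + PySem.List.count ps (true, true),
              tw + PySem.List.count ps (false, false),
              sw + ((l.length : Int) - (PySem.List.count (l.map Prod.snd) "C2" : Int))) := by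
  intro l
  induction l with
  | nil =>
    intro ps h u tc tw sw hps
    simp [gdPairs] at hps
    subst hps
    simp [gdLoopA, PySem.List.count]
  | cons hd tl ih =>
    intro ps h u tc tw sw hps
    obtain ⟨qid, cfg⟩ := hd
    simp only [gdPairs] at hps
    cases hac : pvLook config_labels cfg qid with
    | none => rw [hac] at hps; cases (pvLook config_labels "C2" qid) <;> simp at hps
    | some ac =>
      cases hc2 : pvLook config_labels "C2" qid with
      | none => rw [hac, hc2] at hps; simp at hps
      | some c2 =>
        rw [hac, hc2] at hps
        cases hrest : gdPairs config_labels tl with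
        | none => rw [hrest] at hps; simp at hps
        | some ps' =>
          rw [hrest] at hps
          simp at hps
          subst hps
          simp only [gdLoopA, hac, hc2]
          by_cases hcfg : cfg = "C2" <;>
            cases ac <;> cases c2 <;>
              simp [hcfg, ih ps' _ _ _ _ _ hrest, PySem.List.count, Prod.mk.injEq] <;>
              omega

lemma gdPairs_isSome (config_labels : List (String × List (String × Bool))) :
    ∀ (l : List (String × String)),
      (∀ p ∈ l, (pvLook config_labels p.2 p.1).isSome = true ∧ (pvLook config_labels "C2" p.1).isSome = true) →
      (gdPairs config_labels l).isSome = true := by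
  intro l
  induction l with
  | nil => intro _; simp [gdPairs]
  | cons hd tl ih =>
    intro hpre
    obtain ⟨qid, cfg⟩ := hd
    obtain ⟨h1, h2⟩ := hpre (qid, cfg) (List.mem_cons_self ..)
    obtain ⟨ac, hac⟩ := Option.isSome_iff_exists.mp h1
    obtain ⟨c2, hc2⟩ := Option.isSome_iff_exists.mp h2
    have := ih (fun p hp => hpre p (List.mem_cons_of_mem _ hp))
    obtain ⟨ps, hps⟩ := Option.isSome_iff_exists.mp this
    simp [gdPairs, hac, hc2, hps]

-- ===== VERDICT =====
theorem gain_decomposition_against_c2_spec : Claim_equal_gain_decomposition_against_c2 := by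
  intro q cl _ hpre
  unfold Spec_gain_decomposition_against_c2 gain_decomposition_against_c2 gain_decomposition_against_c2_alt
  obtain ⟨ps, hps⟩ := Option.isSome_iff_exists.mp (gdPairs_isSome cl q hpre)
  rw [hps, gdLoopA_eq_counts cl q ps 0 0 0 0 0 hps]
  simp
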